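-- pv_equiv track=rewrite | github.com/rekriz11/sockeye-recipes | new_scripts/preprocess_data/anonymize_sentences.py | anonymize_data
-- ===== SOURCE A (Python) =====
-- def anonymize_data(sents):
--     anonymized_data = []
--
--     for sent in sents:
--         ori_tokens = sent[0]
--         bio = sent[1]
--         types = sent[2]
--
--         all_nes = []
--         all_types = []
--
--         ## Groups all entities
--         current_ne = []
--         current_type = ""
--         for i in range(len(ori_tokens)):
--             if bio[i] == "B":
--                 if current_ne != []:
--                     all_nes.append(current_ne)
--                     all_types.append(current_type)
--                 current_ne = [i]
--                 current_type = types[i]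
--             elif bio[i] == "I":
--                 current_ne.append(i)
--             else:
--                 if current_ne != []:
--                     all_nes.append(current_ne)
--                     all_types.append(current_type)
--                 current_ne = []
--                 current_type = ""
--         if current_ne != []:
--             all_nes.append(current_ne)
--             all_types.append(current_type)
--
--         ## Makes anonymized dictionary for sentence
--         aner_dict = dict()
--         ne_starts_dict = dict()
--         for i in range(len(all_nes)):
--             anonymized = False
--             c = 1
--             while not anonymized:
--                 try:
--                     a = aner_dict[all_types[i] + "@" + str(c)]
--                     c += 1
--                 except KeyError:
--                     aner_dict[all_types[i] + "@" + str(c)] = " ".join([ori_tokens[j] for j in all_nes[i]])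
--                     ne_starts_dict[all_nes[i][0]] = (all_nes[i], all_types[i] + "@" + str(c))
--                     anonymized = True
--
--         ## Makes anonymized sentence
--         anon_tokens = []
--         i = 0
--         while i < len(ori_tokens):
--             if i not in ne_starts_dict.keys():
--                 anon_tokens.append(ori_tokens[i])
--                 i += 1
--             else:
--                 ## Includes anonymized label
--                 current_ne_label = ne_starts_dict[i][1]
--                 anon_tokens.append(current_ne_label)
--
--                 ## Skips over indices that are part of named entity
--                 current_ne_indices = ne_starts_dict[i][0]
--                 for j in current_ne_indices:
--                     i += 1
--
--         anonymized_data.append((anon_tokens, aner_dict))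
--     return anonymized_data
-- ===== SOURCE B (Python) =====
-- def anonymize_data(sents):
--     result = []
--     for sent in sents:
--         ori_tokens, bio, types = sent[0], sent[1], sent[2]
--         aner_dict = {}
--         anon_tokens = []
--         current_ne = []
--         current_type = ""
--
--         def flush(current_ne, current_type):
--             ## Finalize the pending entity: pick the first unused "type@c" label,
--             ## record it and emit it into the anonymized sentence.
--             if current_ne:
--                 c = 1
--                 while current_type + "@" + str(c) in aner_dict:
--                     c += 1
--                 label = current_type + "@" + str(c)
--                 aner_dict[label] = " ".join(current_ne)
--                 anon_tokens.append(label)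
--
--         for i in range(len(ori_tokens)):
--             tag = bio[i]
--             if tag == "B":
--                 flush(current_ne, current_type)
--                 current_ne = [ori_tokens[i]]
--                 current_type = types[i]
--             elif tag == "I":
--                 current_ne.append(ori_tokens[i])
--             else:
--                 flush(current_ne, current_type)
--                 current_ne = []
--                 current_type = ""
--                 anon_tokens.append(ori_tokens[i])
--         flush(current_ne, current_type)
--
--         result.append((anon_tokens, aner_dict))
--     return result
-- ===== Notes on version B (the rewrite author's own statement) =====
-- stated objective: simpler
-- what changed: B anonymizes in a single left-to-right pass that finalizes each entity on the fly (probing the dict for the first free 'type@c' label and emitting it immediately), eliminating A's three phases and its all_nes/all_types index lists and ne_starts_dict position map entirely.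
import Mathlib
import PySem

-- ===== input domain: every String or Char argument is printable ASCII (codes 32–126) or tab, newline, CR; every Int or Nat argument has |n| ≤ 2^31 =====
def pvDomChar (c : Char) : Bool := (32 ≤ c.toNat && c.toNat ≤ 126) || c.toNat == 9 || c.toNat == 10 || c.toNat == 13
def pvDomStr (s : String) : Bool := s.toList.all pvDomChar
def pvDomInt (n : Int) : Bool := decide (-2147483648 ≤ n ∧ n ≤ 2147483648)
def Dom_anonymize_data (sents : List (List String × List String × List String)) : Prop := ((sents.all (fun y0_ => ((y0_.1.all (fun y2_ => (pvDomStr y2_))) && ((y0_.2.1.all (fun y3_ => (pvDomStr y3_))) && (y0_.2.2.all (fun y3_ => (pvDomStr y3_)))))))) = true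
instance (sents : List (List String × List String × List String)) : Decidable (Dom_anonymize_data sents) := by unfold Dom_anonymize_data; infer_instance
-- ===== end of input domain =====

-- B replaces A's three phases (group entity index lists, label them into two dicts, re-walk the
-- sentence skipping entity positions) by ONE pass that finalizes each entity as soon as it ends;
-- objective: simpler (same asymptotic cost, no index lists and no position map).

-- ===== PORT A =====
-- ori_tokens[j] for an index j produced by the grouping loop is always in range; Pre_ guarantees
-- bio[i]/types[i] are in range wherever A reads them, so the getD defaults are never observed.
def pvTok (toks : List String) (j : Nat) : String := toks.getD j ""

-- " ".join([ori_tokens[j] for j in ne])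
def pvJoinA (toks : List String) (ne : List Nat) : String :=
  PySem.Str.join " " (ne.map (pvTok toks))

-- one iteration of A's grouping loop; state = (all_nes, all_types, current_ne, current_type)
def pvStepGroup (bio types : List String) (st : List (List Nat) × List String × List Nat × String) (i : Nat) :
    List (List Nat) × List String × List Nat × String :=
  match st with
  | (aN, aT, cur, cT) =>
    if bio.getD i "" = "B" then
      if cur ≠ [] then (aN ++ [cur], aT ++ [cT], [i], types.getD i "")
      else (aN, aT, [i], types.getD i "")
    else if bio.getD i "" = "I" then (aN, aT, cur ++ [i], cT)
    else if cur ≠ [] then (aN ++ [cur], aT ++ [cT], [], "")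
    else (aN, aT, [], "")

-- A's 'while not anonymized' probe: first c ≥ 1 with no key t@c; the fuel d.size + 1 can never be
-- exhausted (a dict with size keys cannot contain all of t@1 … t@(size+1)).
def pvFindA (d : PySem.Dict String String) (t : String) (c : Int) : Nat → Int
  | 0 => c
  | fuel + 1 =>
    if (d.get? (t ++ "@" ++ PySem.Int.toStr c)).isSome then pvFindA d t (c + 1) fuel else c

-- one iteration of A's labelling loop; state = (aner_dict, ne_starts_dict)
def pvStepLabel (toks : List String) (aN : List (List Nat)) (aT : List String)
    (st : PySem.Dict String String × PySem.Dict Nat (List Nat × String)) (i : Nat) :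
    PySem.Dict String String × PySem.Dict Nat (List Nat × String) :=
  match st with
  | (aner, starts) =>
    let t := aT.getD i ""
    let ne := aN.getD i []
    let lab := t ++ "@" ++ PySem.Int.toStr (pvFindA aner t 1 (aner.size + 1))
    (aner.insert lab (pvJoinA toks ne), starts.insert (ne.getD 0 0) (ne, lab))

-- A's reconstruction while-loop; i advances by 1 (plain token) or by len(ne) (the inner for-loop
-- that counts the entity's indices); fuel toks.length + 1 suffices since every stored ne is nonempty.
def pvBuildA (toks : List String) (starts : PySem.Dict Nat (List Nat × String)) (i : Nat) : Nat → List String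
  | 0 => []
  | fuel + 1 =>
    if i < toks.length then
      match starts.get? i with
      | none => pvTok toks i :: pvBuildA toks starts (i + 1) fuel
      | some (ne, lab) => lab :: pvBuildA toks starts (i + ne.length) fuel
    else []

def pvSentA (sent : List String × List String × List String) : List String × List (String × String) :=
  match sent with
  | (toks, bio, types) =>
    match (List.range toks.length).foldl (pvStepGroup bio types) ([], [], [], "") with
    | (aN, aT, cur, cT) =>
      let aN := if cur ≠ [] then aN ++ [cur] else aN
      let aT := if cur ≠ [] then aT ++ [cT] else aT
      let p2 := (List.range aN.length).foldl (pvStepLabel toks aN aT) (PySem.Dict.empty, PySem.Dict.empty)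
      (pvBuildA toks p2.2 0 (toks.length + 1), p2.1.items)

def anonymize_data (sents : List (List String × List String × List String)) :
    List (List String × (List (String × String))) :=
  sents.foldl (fun acc sent => acc ++ [pvSentA sent]) []

-- ===== PORT B =====
-- B's 'while label in aner_dict' probe (same shape as A's, written on B's side with 'in'/contains)
def pvFindB (d : PySem.Dict String String) (t : String) (c : Int) : Nat → Int
  | 0 => c
  | fuel + 1 =>
    if d.contains (t ++ "@" ++ PySem.Int.toStr c) then pvFindB d t (c + 1) fuel else c

-- B's flush(): finalize the pending entity (first unused label, record it, emit it)
def pvFlushB (aner : PySem.Dict String String) (anon : List String) (cur : List String) (cT : String) :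
    PySem.Dict String String × List String :=
  if cur ≠ [] then
    let lab := cT ++ "@" ++ PySem.Int.toStr (pvFindB aner cT 1 (aner.size + 1))
    (aner.insert lab (PySem.Str.join " " cur), anon ++ [lab])
  else (aner, anon)

-- one iteration of B's single pass; state = (aner_dict, anon_tokens, current_ne, current_type)
def pvStepB (toks bio types : List String) (st : PySem.Dict String String × List String × List String × String)
    (i : Nat) : PySem.Dict String String × List String × List String × String :=
  match st with
  | (aner, anon, cur, cT) =>
    let tag := bio.getD i ""
    if tag = "B" then
      let f := pvFlushB aner anon cur cT
      (f.1, f.2, [toks.getD i ""], types.getD i "")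
    else if tag = "I" then (aner, anon, cur ++ [toks.getD i ""], cT)
    else
      let f := pvFlushB aner anon cur cT
      (f.1, f.2 ++ [toks.getD i ""], [], "")

def pvSentB (sent : List String × List String × List String) : List String × List (String × String) :=
  match sent with
  | (toks, bio, types) =>
    match (List.range toks.length).foldl (pvStepB toks bio types) (PySem.Dict.empty, [], [], "") with
    | (aner, anon, cur, cT) =>
      let f := pvFlushB aner anon cur cT
      (f.2, f.1.items)

def anonymize_data_alt (sents : List (List String × List String × List String)) :
    List (List String × (List (String × String))) :=
  sents.foldl (fun acc sent => acc ++ [pvSentB sent]) []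

-- ===== PRECONDITION & SPEC =====
-- Exactly the inputs where Python A returns: it raises IndexError iff some position i of a
-- sentence's token list has bio[i] out of range, or bio[i] == "B" with types[i] out of range.
def Pre_anonymize_data (sents : List (List String × List String × List String)) : Prop :=
  ∀ s ∈ sents, s.1.length ≤ s.2.1.length ∧
    ∀ i ∈ List.range s.1.length, s.2.1.getD i "" = "B" → i < s.2.2.length

instance (sents : List (List String × List String × List String)) : Decidable (Pre_anonymize_data sents) := by
  unfold Pre_anonymize_data; infer_instance

def pvWitness_anonymize_data : (List (List String × List String × List String)) :=
  [(["John", "Smith", "met", "Mary"], ["B", "I", "O", "B"], ["PER", "PER", "", "PER"])]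

def Spec_anonymize_data (sents : List (List String × List String × List String))
    (out : List (List String × (List (String × String)))) : Prop := out = anonymize_data_alt sents
instance (sents : List (List String × List String × List String)) (out : List (List String × (List (String × String)))) : Decidable (Spec_anonymize_data sents out) := by unfold Spec_anonymize_data; infer_instance

-- ===== CLAIM (what is proved, stated in full; the proofs are below) =====
def Claim_equal_anonymize_data : Prop := ∀ (sents : List (List String × List String × List String)), Dom_anonymize_data sents → Pre_anonymize_data sents → Spec_anonymize_data sents (anonymize_data sents)

-- ===== LEMMAS AND PROOFS =====

-- (s, k, t): the entity of type t occupying token positions s, s+1, …, s+k-1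
def entNe (e : Nat × Nat × String) : List Nat := List.range' e.1 e.2.1

def entToks (toks : List String) (e : Nat × Nat × String) : List String := (entNe e).map (pvTok toks)

def pvLab (d : PySem.Dict String String) (t : String) : String :=
  t ++ "@" ++ PySem.Int.toStr (pvFindA d t 1 (d.size + 1))

def pvPlain (toks : List String) (p k : Nat) : List String := (List.range' p k).map (pvTok toks)

-- A's phases 2 and 3 evaluated together over an entity list: final aner dict, starts dict, and
-- the anonymized tokens from position p on (plain gaps interleaved with labels)
def p2w (toks : List String) (d : PySem.Dict String String) (S : PySem.Dict Nat (List Nat × String)) (p : Nat) :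
    List (Nat × Nat × String) → PySem.Dict String String × PySem.Dict Nat (List Nat × String) × List String
  | [] => (d, S, [])
  | e :: E =>
    let lab := pvLab d e.2.2
    let r := p2w toks (d.insert lab (PySem.Str.join " " (entToks toks e)))
      (S.insert e.1 (entNe e, lab)) (e.1 + e.2.1) E
    (r.1, r.2.1, pvPlain toks p (e.1 - p) ++ lab :: r.2.2)

def entsEnd (p : Nat) : List (Nat × Nat × String) → Nat
  | [] => p
  | e :: E => entsEnd (e.1 + e.2.1) E

-- entities are nonempty, in increasing position order, disjoint, starting at or after p
def entsOK (p : Nat) : List (Nat × Nat × String) → Prop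
  | [] => True
  | e :: E => p ≤ e.1 ∧ 0 < e.2.1 ∧ entsOK (e.1 + e.2.1) E

theorem pvFind_eq (d : PySem.Dict String String) (t : String) : ∀ (fuel : Nat) (c : Int),
    pvFindB d t c fuel = pvFindA d t c fuel := by
  intro fuel
  induction fuel with
  | zero => intro c; rfl
  | succ n ih =>
    intro c
    simp only [pvFindA, pvFindB, PySem.Dict.contains_eq_isSome_get?, ih]

theorem entsEnd_append (E : List (Nat × Nat × String)) (e : Nat × Nat × String) : ∀ p,
    entsEnd p (E ++ [e]) = e.1 + e.2.1 := by
  induction E with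
  | nil => intro p; rfl
  | cons e' E ih => intro p; simpa [entsEnd] using ih (e'.1 + e'.2.1)

theorem entsEnd_ge (E : List (Nat × Nat × String)) : ∀ p, entsOK p E → p ≤ entsEnd p E := by
  induction E with
  | nil => intro p _; simp [entsEnd]
  | cons e E ih =>
    intro p h
    have h1 := h.1
    have := ih (e.1 + e.2.1) h.2.2
    simp only [entsEnd]
    omega

theorem entsOK_start_ge (E : List (Nat × Nat × String)) : ∀ p, entsOK p E → ∀ e ∈ E, p ≤ e.1 := by
  induction E with
  | nil => intro p _ e he; simp at he
  | cons e' E ih =>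
    intro p h e he
    rcases List.mem_cons.1 he with rfl | he
    · exact h.1
    · have h1 := h.1
      have := ih (e'.1 + e'.2.1) h.2.2 e he; omega

theorem entsOK_pos (E : List (Nat × Nat × String)) : ∀ p, entsOK p E → ∀ e ∈ E, 0 < e.2.1 := by
  induction E with
  | nil => intro p _ e he; simp at he
  | cons e' E ih =>
    intro p h e he
    rcases List.mem_cons.1 he with rfl | he
    · exact h.2.1
    · exact ih (e'.1 + e'.2.1) h.2.2 e he

theorem entsOK_append (E : List (Nat × Nat × String)) (s k : Nat) (t : String) : ∀ p,
    entsOK p E → entsEnd p E ≤ s → 0 < k → entsOK p (E ++ [(s, k, t)]) := by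
  induction E with
  | nil => intro p _ h1 h2; exact ⟨h1, h2, trivial⟩
  | cons e E ih =>
    intro p h h1 h2
    exact ⟨h.1, h.2.1, ih (e.1 + e.2.1) h.2.2 h1 h2⟩

theorem p2w_append (toks : List String) (E : List (Nat × Nat × String)) (e : Nat × Nat × String) :
    ∀ d S p, p2w toks d S p (E ++ [e]) =
      ((p2w toks d S p E).1.insert (pvLab (p2w toks d S p E).1 e.2.2) (PySem.Str.join " " (entToks toks e)),
       (p2w toks d S p E).2.1.insert e.1 (entNe e, pvLab (p2w toks d S p E).1 e.2.2),
       (p2w toks d S p E).2.2 ++ pvPlain toks (entsEnd p E) (e.1 - entsEnd p E)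
         ++ [pvLab (p2w toks d S p E).1 e.2.2]) := by
  induction E with
  | nil => intro d S p; simp [p2w, entsEnd]
  | cons e' E ih =>
    intro d S p
    simp only [List.cons_append, p2w, entsEnd, ih]
    simp [List.append_assoc]

-- the S component of p2w keeps S-entries whose key is none of the entity starts
theorem p2w_S_get? (toks : List String) (E : List (Nat × Nat × String)) :
    ∀ d S p i, (∀ e ∈ E, e.1 ≠ i) → ((p2w toks d S p E).2.1).get? i = S.get? i := by
  induction E with
  | nil => intro d S p i _; rfl
  | cons e E ih =>
    intro d S p i h
    simp only [p2w]
    rw [ih _ _ _ _ (fun e' he' => h e' (List.mem_cons_of_mem _ he'))]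
    exact PySem.Dict.get?_insert_of_ne S _ (fun hi => h e (List.mem_cons_self) hi.symm)

theorem build_ge (toks : List String) (S : PySem.Dict Nat (List Nat × String)) (p : Nat)
    (h : toks.length ≤ p) : ∀ fuel, pvBuildA toks S p fuel = [] := by
  intro fuel; cases fuel with
  | zero => rfl
  | succ f => simp [pvBuildA]; omega

theorem walk_plain (toks : List String) (S : PySem.Dict Nat (List Nat × String)) :
    ∀ k p fuel, (∀ i, p ≤ i → i < p + k → S.get? i = none) → p + k ≤ toks.length → k ≤ fuel →
    pvBuildA toks S p fuel = pvPlain toks p k ++ pvBuildA toks S (p + k) (fuel - k) := by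
  intro k
  induction k with
  | zero => intro p fuel _ _ _; simp [pvPlain]
  | succ k ih =>
    intro p fuel hnone hlen hfuel
    obtain ⟨f, rfl⟩ : ∃ f, fuel = f + 1 := ⟨fuel - 1, by omega⟩
    have hp : p < toks.length := by omega
    have h0 : S.get? p = none := hnone p le_rfl (by omega)
    have step : pvBuildA toks S p (f + 1) = pvTok toks p :: pvBuildA toks S (p + 1) f := by
      simp [pvBuildA, hp, h0]
    rw [step, ih (p + 1) f (fun i h1 h2 => hnone i (by omega) (by omega)) (by omega) (by omega)]
    have : pvPlain toks p (k + 1) = pvTok toks p :: pvPlain toks (p + 1) k := by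
      simp [pvPlain, List.range'_succ]
    rw [this]
    have e1 : p + 1 + k = p + (k + 1) := by omega
    have e2 : f - k = f + 1 - (k + 1) := by omega
    rw [e1, e2]
    simp

theorem build_main (toks : List String) : ∀ (E : List (Nat × Nat × String))
    (d : PySem.Dict String String) (S : PySem.Dict Nat (List Nat × String)) (p fuel : Nat),
    entsOK p E → entsEnd p E ≤ toks.length → toks.length + 1 ≤ fuel + p →
    (∀ i, p ≤ i → S.get? i = none) →
    pvBuildA toks ((p2w toks d S p E).2.1) p fuel
      = (p2w toks d S p E).2.2 ++ pvPlain toks (entsEnd p E) (toks.length - entsEnd p E) := by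
  intro E
  induction E with
  | nil =>
    intro d S p fuel _ h2 h3 h4
    simp only [p2w, entsEnd] at *
    rw [walk_plain toks S (toks.length - p) p fuel (fun i hi _ => h4 i hi) (by omega) (by omega)]
    have hpl : p + (toks.length - p) = toks.length := by omega
    rw [hpl, build_ge toks S _ le_rfl]
    simp
  | cons e E ih =>
    intro d S p fuel h1 h2 h3 h4
    obtain ⟨hpe, hk, hok⟩ := h1
    have hstart := entsOK_start_ge E (e.1 + e.2.1) hok
    have hend := entsEnd_ge E (e.1 + e.2.1) hok
    have hEnd2 : entsEnd p (e :: E) = entsEnd (e.1 + e.2.1) E := rfl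
    have heN : e.1 + e.2.1 ≤ toks.length := by rw [hEnd2] at h2; omega
    simp only [p2w, entsEnd] at h2 ⊢
    set lab := pvLab d e.2.2 with hlab
    set d' := d.insert lab (PySem.Str.join " " (entToks toks e)) with hd'
    set S' := S.insert e.1 (entNe e, lab) with hS'
    set Sf := (p2w toks d' S' (e.1 + e.2.1) E).2.1 with hSf
    have none1 : ∀ i, p ≤ i → i < p + (e.1 - p) → Sf.get? i = none := by
      intro i hi hi2
      rw [hSf, p2w_S_get? toks E d' S' _ i (fun e' he' hne => by have := hstart e' he'; omega)]
      rw [hS', PySem.Dict.get?_insert_of_ne S _ (by omega)]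
      exact h4 i hi
    have hit : Sf.get? e.1 = some (entNe e, lab) := by
      rw [hSf, p2w_S_get? toks E d' S' _ e.1 (fun e' he' hne => by have := hstart e' he'; omega)]
      rw [hS']
      exact PySem.Dict.get?_insert_self S e.1 (entNe e, lab)
    rw [walk_plain toks Sf (e.1 - p) p fuel none1 (by omega) (by omega)]
    have hpe1 : p + (e.1 - p) = e.1 := by omega
    rw [hpe1]
    obtain ⟨f, hf⟩ : ∃ f, fuel - (e.1 - p) = f + 1 := ⟨fuel - (e.1 - p) - 1, by omega⟩
    rw [hf]
    have he1N : e.1 < toks.length := by omega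
    have step : pvBuildA toks Sf e.1 (f + 1) = lab :: pvBuildA toks Sf (e.1 + e.2.1) f := by
      simp [pvBuildA, he1N, hit, entNe]
    rw [step]
    have hnone' : ∀ i, e.1 + e.2.1 ≤ i → S'.get? i = none := by
      intro i hi
      rw [hS', PySem.Dict.get?_insert_of_ne S _ (by omega)]
      exact h4 i (by omega)
    rw [hSf, ih d' S' (e.1 + e.2.1) f hok (by omega) (by omega) hnone']
    simp

theorem p2_fold (toks : List String) : ∀ (E : List (Nat × Nat × String))
    (d : PySem.Dict String String) (S : PySem.Dict Nat (List Nat × String)) (p : Nat),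
    (∀ e ∈ E, 0 < e.2.1) →
    (List.range E.length).foldl (pvStepLabel toks (E.map entNe) (E.map (fun e => e.2.2))) (d, S)
      = ((p2w toks d S p E).1, (p2w toks d S p E).2.1) := by
  intro E
  induction E with
  | nil => intro d S p _; rfl
  | cons e E ih =>
    intro d S p hpos
    have hk := hpos e List.mem_cons_self
    have hstep : pvStepLabel toks ((e :: E).map entNe) ((e :: E).map (fun e => e.2.2)) (d, S) 0
        = (d.insert (pvLab d e.2.2) (PySem.Str.join " " (entToks toks e)),
           S.insert e.1 (entNe e, pvLab d e.2.2)) := by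
      have h0 : (entNe e)[0]?.getD 0 = e.1 := by
        obtain ⟨k', hk'⟩ : ∃ k', e.2.1 = k' + 1 := ⟨e.2.1 - 1, by omega⟩
        simp [entNe, hk', List.range'_succ]
      simp [pvStepLabel, pvLab, pvJoinA, entToks, h0]
    have hshift : ∀ (st : PySem.Dict String String × PySem.Dict Nat (List Nat × String)) (i : Nat),
        pvStepLabel toks ((e :: E).map entNe) ((e :: E).map (fun e => e.2.2)) st (i + 1)
        = pvStepLabel toks (E.map entNe) (E.map (fun e => e.2.2)) st i := by
      intro st i
      obtain ⟨a, b⟩ := st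
      simp [pvStepLabel]
    simp only [List.length_cons, List.range_succ_eq_map, List.foldl_cons, hstep, List.foldl_map,
      Nat.succ_eq_add_one, hshift, p2w]
    exact ih _ _ (e.1 + e.2.1) (fun e' he' => hpos e' (List.mem_cons_of_mem _ he'))

theorem pvFlushB_ne (aner : PySem.Dict String String) (anon cur : List String) (cT : String) (h : cur ≠ []) :
    pvFlushB aner anon cur cT
      = (aner.insert (pvLab aner cT) (PySem.Str.join " " cur), anon ++ [pvLab aner cT]) := by
  simp [pvFlushB, h, pvLab, pvFind_eq]

theorem pvFlushB_nil (aner : PySem.Dict String String) (anon : List String) (cT : String) :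
    pvFlushB aner anon [] cT = (aner, anon) := by
  simp [pvFlushB]

-- the joint loop invariant: after n steps, A's grouping state and B's one-pass state are both
-- determined by the list E of finished entities, the start s of the pending run [s, n), and its type
theorem pvInv (toks bio types : List String) : ∀ n : Nat, ∃ E s cT, s ≤ n ∧ entsOK 0 E ∧ entsEnd 0 E ≤ s ∧
    (List.range n).foldl (pvStepGroup bio types) ([], [], [], "")
      = (E.map entNe, E.map (fun e => e.2.2), List.range' s (n - s), cT) ∧
    (List.range n).foldl (pvStepB toks bio types) (PySem.Dict.empty, [], [], "")
      = ((p2w toks PySem.Dict.empty PySem.Dict.empty 0 E).1,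
         (p2w toks PySem.Dict.empty PySem.Dict.empty 0 E).2.2
           ++ pvPlain toks (entsEnd 0 E) (s - entsEnd 0 E),
         (List.range' s (n - s)).map (pvTok toks), cT) := by
  intro n
  induction n with
  | zero =>
    exact ⟨[], 0, "", le_rfl, trivial, le_rfl, by simp,
      by simp [p2w, pvPlain]⟩
  | succ n ih =>
    obtain ⟨E, s, cT, hsn, hok, hend, hA, hB⟩ := ih
    have hA' : (List.range (n + 1)).foldl (pvStepGroup bio types) ([], [], [], "")
        = pvStepGroup bio types (E.map entNe, E.map (fun e => e.2.2), List.range' s (n - s), cT) n := by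
      rw [List.range_succ, List.foldl_append, hA]; rfl
    have hB' : (List.range (n + 1)).foldl (pvStepB toks bio types) (PySem.Dict.empty, [], [], "")
        = pvStepB toks bio types
            ((p2w toks PySem.Dict.empty PySem.Dict.empty 0 E).1,
             (p2w toks PySem.Dict.empty PySem.Dict.empty 0 E).2.2
               ++ pvPlain toks (entsEnd 0 E) (s - entsEnd 0 E),
             (List.range' s (n - s)).map (pvTok toks), cT) n := by
      rw [List.range_succ, List.foldl_append, hB]; rfl
    by_cases hlt : s < n
    case pos =>
      have hcur : List.range' s (n - s) ≠ [] := by simp [List.range'_eq_nil_iff]; omega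
      have hbcur : (List.range' s (n - s)).map (pvTok toks) ≠ [] := by
        simpa using hcur
      have hEnd' : entsEnd 0 (E ++ [(s, n - s, cT)]) = n := by rw [entsEnd_append]; show s + (n - s) = n; omega
      have hOK' : entsOK 0 (E ++ [(s, n - s, cT)]) := entsOK_append E s (n - s) cT 0 hok hend (by omega)
      have hpw := p2w_append toks E (s, n - s, cT) PySem.Dict.empty PySem.Dict.empty 0
      by_cases h1 : bio[n]?.getD "" = "B"
      case pos =>
        refine ⟨E ++ [(s, n - s, cT)], n, types.getD n "", by omega, hOK', by omega, ?_, ?_⟩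
        · rw [hA']
          simp [pvStepGroup, h1, hcur, entNe, List.range'_succ]
        · rw [hB']
          simp only [pvStepB, List.getD_eq_getElem?_getD, h1, pvFlushB_ne _ _ _ _ hbcur, hpw, hEnd']
          simp [entToks, entNe, pvPlain, pvTok, List.range'_succ]
      case neg =>
        by_cases h2 : bio[n]?.getD "" = "I"
        case pos =>
          refine ⟨E, s, cT, by omega, hok, by omega, ?_, ?_⟩
          · rw [hA']
            have hr : List.range' s (n + 1 - s) = List.range' s (n - s) ++ [n] := by
              have hh : n + 1 - s = (n - s) + 1 := by omega
              rw [hh, List.range'_1_concat]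
              congr 2
              omega
            simp [pvStepGroup, h2, hr]
          · rw [hB']
            have hr : List.range' s (n + 1 - s) = List.range' s (n - s) ++ [n] := by
              have hh : n + 1 - s = (n - s) + 1 := by omega
              rw [hh, List.range'_1_concat]
              congr 2
              omega
            simp [pvStepB, h2, hr, pvTok]
        case neg =>
          refine ⟨E ++ [(s, n - s, cT)], n + 1, "", le_rfl, hOK', by omega, ?_, ?_⟩
          · rw [hA']
            simp [pvStepGroup, h1, h2, hcur, entNe]
          · rw [hB']
            simp only [pvStepB, List.getD_eq_getElem?_getD, h1, h2, pvFlushB_ne _ _ _ _ hbcur, hpw, hEnd']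
            simp [entToks, entNe, pvPlain, pvTok, List.range'_succ]
    case neg =>
      have hseq : s = n := by omega
      subst hseq
      have hcur : List.range' s (s - s) = [] := by simp
      rw [hcur] at hA' hB'
      by_cases h1 : bio[s]?.getD "" = "B"
      case pos =>
        refine ⟨E, s, types.getD s "", by omega, hok, hend, ?_, ?_⟩
        · rw [hA']
          simp [pvStepGroup, h1]
        · rw [hB']
          simp only [pvStepB, List.getD_eq_getElem?_getD, h1, List.map_nil, pvFlushB_nil]
          simp [pvPlain, pvTok, List.range'_succ]
      case neg =>
        by_cases h2 : bio[s]?.getD "" = "I"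
        case pos =>
          refine ⟨E, s, cT, by omega, hok, hend, ?_, ?_⟩
          · rw [hA']
            have hr : List.range' s (s + 1 - s) = [s] := by
              have hh : s + 1 - s = 1 := by omega
              rw [hh]; rfl
            simp [pvStepGroup, h2]
          · rw [hB']
            have hr : List.range' s (s + 1 - s) = [s] := by
              have hh : s + 1 - s = 1 := by omega
              rw [hh]; rfl
            simp [pvStepB, h2, pvTok]
        case neg =>
          refine ⟨E, s + 1, "", le_rfl, hok, by omega, ?_, ?_⟩
          · rw [hA']
            simp [pvStepGroup, h1, h2]
          · rw [hB']
            simp only [pvStepB, List.getD_eq_getElem?_getD, h1, h2, List.map_nil, pvFlushB_nil]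
            have hr : pvPlain toks (entsEnd 0 E) (s + 1 - entsEnd 0 E)
                = pvPlain toks (entsEnd 0 E) (s - entsEnd 0 E) ++ [pvTok toks s] := by
              have hh : s + 1 - entsEnd 0 E = (s - entsEnd 0 E) + 1 := by omega
              rw [pvPlain, hh, List.range'_1_concat]
              have hh2 : entsEnd 0 E + (s - entsEnd 0 E) = s := by omega
              simp [pvPlain, hh2]
            simp [hr, pvTok]

theorem pvSent_eq (sent : List String × List String × List String) : pvSentA sent = pvSentB sent := by
  obtain ⟨toks, bio, types⟩ := sent
  obtain ⟨E, s, cT, hsn, hok, hend, hA, hB⟩ := pvInv toks bio types toks.length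
  by_cases hlt : s < toks.length
  case pos =>
    have hcur : List.range' s (toks.length - s) ≠ [] := by simp [List.range'_eq_nil_iff]; omega
    have hbcur : (List.range' s (toks.length - s)).map (pvTok toks) ≠ [] := by simpa using hcur
    have hOK' : entsOK 0 (E ++ [(s, toks.length - s, cT)]) :=
      entsOK_append E s (toks.length - s) cT 0 hok hend (by omega)
    have hEnd' : entsEnd 0 (E ++ [(s, toks.length - s, cT)]) = toks.length := by
      rw [entsEnd_append]; show s + (toks.length - s) = toks.length; omega
    have hpw := p2w_append toks E (s, toks.length - s, cT) PySem.Dict.empty PySem.Dict.empty 0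
    have hmap : E.map entNe ++ [List.range' s (toks.length - s)]
        = (E ++ [(s, toks.length - s, cT)]).map entNe := by simp [entNe]
    have hmap2 : E.map (fun e => e.2.2) ++ [cT]
        = (E ++ [(s, toks.length - s, cT)]).map (fun e => e.2.2) := by simp
    have hp2 := p2_fold toks (E ++ [(s, toks.length - s, cT)]) PySem.Dict.empty PySem.Dict.empty 0
      (entsOK_pos _ 0 hOK')
    have hbuild := build_main toks (E ++ [(s, toks.length - s, cT)]) PySem.Dict.empty
      PySem.Dict.empty 0 (toks.length + 1) hOK' (by omega) (by omega) (fun i _ => by simp [pysem])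
    simp only [pvSentA, pvSentB, hA, hB]
    simp only [hcur, ne_eq, not_false_iff, if_true]
    rw [hmap, hmap2]
    rw [List.length_map]
    rw [hp2]
    simp only [pvFlushB_ne _ _ _ _ hbcur]
    rw [hbuild]
    rw [hEnd']
    simp [hpw, entToks, entNe, pvPlain]
  case neg =>
    have hseq : s = toks.length := by omega
    have hcur : List.range' s (toks.length - s) = [] := by
      have h0 : toks.length - s = 0 := by omega
      simp [h0]
    rw [hcur] at hA hB
    rw [hseq] at hB
    have hp2 := p2_fold toks E PySem.Dict.empty PySem.Dict.empty 0 (entsOK_pos _ 0 hok)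
    have hbuild := build_main toks E PySem.Dict.empty PySem.Dict.empty 0 (toks.length + 1) hok
      (by omega) (by omega) (fun i _ => by simp [pysem])
    simp only [pvSentA, pvSentB, hA, hB]
    simp only [ne_eq, not_true, if_false, List.map_nil]
    rw [List.length_map]
    rw [hp2]
    simp only [pvFlushB_nil]
    rw [hbuild]

-- ===== VERDICT (by name: the statement is the Claim_ definition above) =====
theorem anonymize_data_spec : Claim_equal_anonymize_data := by
  intro sents _ _
  unfold Spec_anonymize_data anonymize_data anonymize_data_alt
  induction sents using List.reverseRecOn with
  | nil => rfl
  | append_singleton xs x ih => simp [List.foldl_append, pvSent_eq]
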